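-- pv_equiv track=rewrite | github.com/p-lots/codewars | 7-kyu/multiplicative-persistence----what's-special-about-277777788888899-/python/solution.py | per
-- ===== SOURCE A (Python) =====
-- from functools import reduce
-- from operator import mul
--
-- def per(n):
--     ret = []
--     if n < 10:
--         return ret
--     while len(str(n)) > 1:
--         new_n = int(reduce(mul, map(int, str(n))))
--         ret.append(new_n)
--         n = new_n
--     return ret
-- ===== SOURCE B (Python) =====
-- def digit_product(m):
--     return m if m < 10 else (m % 10) * digit_product(m // 10)
--
-- def per(n):
--     if n < 10:
--         return []
--     p = digit_product(n)
--     return [p] + per(p)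
-- ===== Notes on version B (the rewrite author's own statement) =====
-- stated objective: alternative
-- what changed: Replaces the while-loop over str(n) (string conversion, map(int,...), reduce(mul,...), list mutation) by direct recursion on the shrinking digit-product, with the digit product computed arithmetically via modulus and floor division instead of through the decimal string.
import Mathlib
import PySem

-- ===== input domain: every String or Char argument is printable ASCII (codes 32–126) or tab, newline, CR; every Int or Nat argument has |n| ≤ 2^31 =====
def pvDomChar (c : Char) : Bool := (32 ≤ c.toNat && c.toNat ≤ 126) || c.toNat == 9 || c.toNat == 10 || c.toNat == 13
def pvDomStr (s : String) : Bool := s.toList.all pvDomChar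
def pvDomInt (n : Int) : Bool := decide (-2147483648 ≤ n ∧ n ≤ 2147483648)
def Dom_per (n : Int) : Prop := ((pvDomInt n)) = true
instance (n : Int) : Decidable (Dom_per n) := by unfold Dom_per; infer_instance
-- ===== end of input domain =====

-- B replaces A's while-loop over str(n) by direct recursion on the shrinking
-- digit-product, computing the digit product arithmetically (% 10, // 10)
-- instead of through the decimal string (objective: alternative).

-- ===== PORT A =====
-- int(d) for a one-character string d; exact on the digit characters the loop reaches
def pvCharInt (c : Char) : Int := (PySem.Int.ofChars? [c]).getD 0

-- reduce(mul, xs): head as initial accumulator, folded over the tail ([] unreachable: str(n) is nonempty)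
def pvReduceMul : List Int → Int
  | [] => 0
  | x :: xs => xs.foldl (· * ·) x

-- the while-loop of A; the fuel argument only makes the recursion total (it never runs out: per supplies n.toNat + 1 and the digit product strictly decreases)
def perLoop : Nat → Int → List Int
  | 0, _ => []
  | f + 1, n =>
    if 1 < (PySem.Int.toChars n).length then
      let newN := pvReduceMul ((PySem.Int.toChars n).map pvCharInt)
      newN :: perLoop f newN
    else []

def per (n : Int) : List Int :=
  if n < 10 then [] else perLoop (n.toNat + 1) n

-- ===== PORT B =====
-- digit_product(m) = m if m < 10 else (m % 10) * digit_product(m // 10)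
def digitProduct (m : Int) : Int :=
  if m < 10 then m
  else PySem.Int.mod m 10 * digitProduct (PySem.Int.floordiv m 10)
termination_by m.toNat
decreasing_by
  rw [PySem.Int.floordiv_eq_ediv_of_pos (by omega : (0:Int) < 10)]
  omega

theorem digitProduct_nonneg : ∀ m : Int, 0 ≤ m → 0 ≤ digitProduct m := by
  intro m
  induction m using digitProduct.induct with
  | case1 m h => intro _; rw [digitProduct, if_pos h]; omega
  | case2 m h ih =>
    intro hm
    rw [digitProduct, if_neg h]
    have h10 : (0:Int) < 10 := by omega
    have hq := ih (by
      rw [PySem.Int.floordiv_eq_ediv_of_pos h10]; omega)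
    have hr := PySem.Int.mod_nonneg m h10
    exact mul_nonneg hr hq

theorem digitProduct_le : ∀ m : Int, 0 ≤ m → digitProduct m ≤ m := by
  intro m
  induction m using digitProduct.induct with
  | case1 m h => intro _; rw [digitProduct, if_pos h]
  | case2 m h ih =>
    intro hm
    rw [digitProduct, if_neg h]
    have h10 : (0:Int) < 10 := by omega
    rw [PySem.Int.floordiv_eq_ediv_of_pos h10, PySem.Int.mod_eq_emod_of_pos h10] at *
    have hq0 : 0 ≤ m / 10 := by omega
    have hqle := ih hq0
    have hqn := digitProduct_nonneg (m / 10) hq0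
    have h1 : m % 10 * digitProduct (m / 10) ≤ 9 * digitProduct (m / 10) :=
      mul_le_mul_of_nonneg_right (by omega) hqn
    have h2 : 9 * digitProduct (m / 10) ≤ 9 * (m / 10) :=
      mul_le_mul_of_nonneg_left hqle (by omega)
    have h3 : 10 * (m / 10) ≤ m := by omega
    linarith

theorem digitProduct_lt (m : Int) (hm : 10 ≤ m) : digitProduct m < m := by
  rw [digitProduct, if_neg (by omega)]
  have h10 : (0:Int) < 10 := by omega
  rw [PySem.Int.floordiv_eq_ediv_of_pos h10, PySem.Int.mod_eq_emod_of_pos h10]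
  have hq0 : 0 ≤ m / 10 := by omega
  have hq1 : 1 ≤ m / 10 := by omega
  have hqle := digitProduct_le (m / 10) hq0
  have hqn := digitProduct_nonneg (m / 10) hq0
  have h1 : m % 10 * digitProduct (m / 10) ≤ 9 * digitProduct (m / 10) :=
    mul_le_mul_of_nonneg_right (by omega) hqn
  have h2 : 9 * digitProduct (m / 10) ≤ 9 * (m / 10) :=
    mul_le_mul_of_nonneg_left hqle (by omega)
  have h3 : 10 * (m / 10) ≤ m := by omega
  linarith

-- per(n) = [] if n < 10 else [p] + per(p) with p = digit_product(n)
def per_alt (n : Int) : List Int :=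
  if n < 10 then []
  else digitProduct n :: per_alt (digitProduct n)
termination_by n.toNat
decreasing_by
  have h1 := digitProduct_lt n (by omega)
  have _h2 := digitProduct_nonneg n (by omega)
  omega

-- ===== PRECONDITION & SPEC =====
def Spec_per (n : Int) (out : List Int) : Prop := out = per_alt n
instance (n : Int) (out : List Int) : Decidable (Spec_per n out) := by unfold Spec_per; infer_instance

-- ===== CLAIM (what is proved, stated in full; the proofs are below) =====
def Claim_equal_per : Prop := ∀ (n : Int), Dom_per n → Spec_per n (per n)

-- ===== LEMMAS AND PROOFS =====

-- decimal digit characters of m, most significant first (characterises Nat.toDigits 10)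
def pvDigits (m : Nat) : List Char :=
  if m / 10 = 0 then [Nat.digitChar (m % 10)]
  else pvDigits (m / 10) ++ [Nat.digitChar (m % 10)]
termination_by m
decreasing_by omega

theorem toDigitsCore_eq_pvDigits :
    ∀ (f m : Nat) (ds : List Char), m < f →
      Nat.toDigitsCore 10 f m ds = pvDigits m ++ ds := by
  intro f
  induction f with
  | zero => intro m ds h; omega
  | succ f ih =>
    intro m ds h
    rw [Nat.toDigitsCore, pvDigits]
    by_cases hq : m / 10 = 0
    · simp [hq]
    · have hm : 10 ≤ m := by omega
      have : m / 10 < f := by omega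
      simp only [hq, if_false]
      rw [ih (m / 10) ((m % 10).digitChar :: ds) this]
      simp

theorem toChars_of_nonneg (n : Int) (hn : 0 ≤ n) :
    PySem.Int.toChars n = pvDigits n.toNat := by
  rw [PySem.Int.toChars, if_neg (by omega), Nat.toDigits,
      toDigitsCore_eq_pvDigits (n.toNat + 1) n.toNat [] (by omega), List.append_nil]

theorem pvDigits_ne_nil (m : Nat) : pvDigits m ≠ [] := by
  rw [pvDigits]; split <;> simp

theorem pvDigits_small (m : Nat) (h : m < 10) : pvDigits m = [Nat.digitChar m] := by
  rw [pvDigits, if_pos (by omega), Nat.mod_eq_of_lt h]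

theorem pvDigits_length_small (m : Nat) (h : m < 10) :
    ¬ 1 < (pvDigits m).length := by
  rw [pvDigits_small m h]; simp

theorem pvDigits_length_big (m : Nat) (h : 10 ≤ m) :
    1 < (pvDigits m).length := by
  rw [pvDigits, if_neg (by omega)]
  have h0 : 0 < (pvDigits (m / 10)).length :=
    List.length_pos_iff.mpr (pvDigits_ne_nil (m / 10))
  simp only [List.length_append, List.length_cons, List.length_nil]
  omega

theorem pvCharInt_digitChar (d : Nat) (h : d < 10) :
    pvCharInt (Nat.digitChar d) = (d : Int) := by
  interval_cases d <;> decide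

theorem foldl_mul_eq (xs : List Int) : ∀ a : Int, xs.foldl (· * ·) a = a * xs.prod := by
  induction xs with
  | nil => intro a; simp
  | cons x xs ih => intro a; simp [List.foldl_cons, ih, List.prod_cons, mul_assoc]

theorem pvReduceMul_eq_prod (x : Int) (xs : List Int) :
    pvReduceMul (x :: xs) = (x :: xs).prod := by
  simp [pvReduceMul, foldl_mul_eq, List.prod_cons]

theorem prod_map_pvDigits : ∀ m : Nat,
    ((pvDigits m).map pvCharInt).prod = digitProduct (m : Int) := by
  intro m
  induction m using pvDigits.induct with
  | case1 m hq =>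
    have hm : m < 10 := by omega
    rw [pvDigits_small m hm]
    simp only [List.map_cons, List.map_nil, List.prod_cons, List.prod_nil, mul_one]
    rw [pvCharInt_digitChar m hm, digitProduct,
        if_pos (show (m : Int) < 10 by exact_mod_cast hm)]
  | case2 m hq ih =>
    have hm : 10 ≤ m := by omega
    have hmod : m % 10 < 10 := by omega
    have hmodc : PySem.Int.mod (m : Int) 10 = ((m % 10 : Nat) : Int) := by
      exact_mod_cast PySem.Int.mod_natCast m 10
    have hdivc : PySem.Int.floordiv (m : Int) 10 = ((m / 10 : Nat) : Int) := by
      exact_mod_cast PySem.Int.floordiv_natCast m 10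
    have hdp : digitProduct (m : Int)
        = ((m % 10 : Nat) : Int) * digitProduct ((m / 10 : Nat) : Int) := by
      rw [digitProduct,
        if_neg (show ¬ (m : Int) < 10 by exact_mod_cast (by omega : ¬ m < 10)),
        hmodc, hdivc]
    rw [pvDigits, if_neg hq, List.map_append, List.prod_append]
    simp only [List.map_cons, List.map_nil, List.prod_cons, List.prod_nil, mul_one]
    rw [pvCharInt_digitChar (m % 10) hmod, ih, hdp]
    ring

theorem pvStep_eq (n : Int) (hn : 0 ≤ n) :
    pvReduceMul ((PySem.Int.toChars n).map pvCharInt) = digitProduct n := by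
  rw [toChars_of_nonneg n hn]
  obtain ⟨c, cs, hc⟩ := List.exists_cons_of_ne_nil (pvDigits_ne_nil n.toNat)
  rw [hc, List.map_cons, pvReduceMul_eq_prod, ← List.map_cons, ← hc,
      prod_map_pvDigits n.toNat]
  congr 1
  omega

theorem perLoop_eq_per_alt :
    ∀ (f : Nat) (n : Int), 0 ≤ n → n.toNat < f → perLoop f n = per_alt n := by
  intro f
  induction f with
  | zero => intro n _ h; omega
  | succ f ih =>
    intro n hn hf
    rw [perLoop, toChars_of_nonneg n hn]
    by_cases hbig : 10 ≤ n
    · have h1 := pvDigits_length_big n.toNat (by omega)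
      rw [if_pos h1]
      simp only [← toChars_of_nonneg n hn]
      rw [pvStep_eq n hn]
      have hp0 := digitProduct_nonneg n hn
      have hplt := digitProduct_lt n hbig
      rw [ih (digitProduct n) hp0 (by omega)]
      conv_rhs => rw [per_alt, if_neg (show ¬ n < 10 by omega)]
    · have h1 := pvDigits_length_small n.toNat (by omega)
      rw [if_neg h1, per_alt, if_pos (by omega)]

-- ===== VERDICT (by name: the statement is the Claim_ definition above) =====
theorem per_spec : Claim_equal_per := by
  intro n _
  unfold Spec_per per
  by_cases h : n < 10
  · rw [if_pos h, per_alt, if_pos h]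
  · rw [if_neg h]
    exact perLoop_eq_per_alt (n.toNat + 1) n (by omega) (by omega)
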